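-- pv_equiv track=rewrite | github.com/pankaxz/TaxonomyCleaner | CanonicalData/main.py | sort_canonical_data
-- ===== SOURCE A (Python) =====
-- def sort_canonical_data(data):
--     if not data:
--         return None
--
--     sorted_data = {}
--     # Sort categories (keys of the main dictionary)
--     for category in sorted(data.keys(), key=str.lower):
--         sorted_data[category] = {}
--         # Sort subcategories (keys of the inner dictionary)
--         for subcategory in sorted(data[category].keys(), key=str.lower):
--             # Sort the list of values for each subcategory
--             sorted_data[category][subcategory] = sorted(data[category][subcategory], key=str.lower)
--
--     return sorted_data
-- ===== SOURCE B (Python) =====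
-- def sort_canonical_data(data):
--     if not data:
--         return None
--     # flatten to (category, subcategory, values) rows, radix-sort them with two
--     # stable passes (subcategory key, then category key), and regroup into a
--     # result dict pre-seeded with the categories in case-insensitive order
--     rows = [(c, s, vals) for c, subs in data.items() for s, vals in subs.items()]
--     rows.sort(key=lambda r: r[1].lower())
--     rows.sort(key=lambda r: r[0].lower())
--     result = {c: {} for c in sorted(data, key=str.lower)}
--     for c, s, vals in rows:
--         result[c][s] = sorted(vals, key=str.lower)
--     return result
-- ===== Notes on version B (the rewrite author's own statement) =====
-- stated objective: alternative
-- what changed: Instead of A's three nested per-level sort loops (sort outer keys, then for each category sort its subkeys with dict lookups), B flattens the whole structure into (category, subcategory, values) rows, orders them with two stable radix-style sort passes (by subcategory key, then by category key), and regroups the rows into a result dict pre-seeded with the categories in case-insensitive order.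
import Mathlib
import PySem

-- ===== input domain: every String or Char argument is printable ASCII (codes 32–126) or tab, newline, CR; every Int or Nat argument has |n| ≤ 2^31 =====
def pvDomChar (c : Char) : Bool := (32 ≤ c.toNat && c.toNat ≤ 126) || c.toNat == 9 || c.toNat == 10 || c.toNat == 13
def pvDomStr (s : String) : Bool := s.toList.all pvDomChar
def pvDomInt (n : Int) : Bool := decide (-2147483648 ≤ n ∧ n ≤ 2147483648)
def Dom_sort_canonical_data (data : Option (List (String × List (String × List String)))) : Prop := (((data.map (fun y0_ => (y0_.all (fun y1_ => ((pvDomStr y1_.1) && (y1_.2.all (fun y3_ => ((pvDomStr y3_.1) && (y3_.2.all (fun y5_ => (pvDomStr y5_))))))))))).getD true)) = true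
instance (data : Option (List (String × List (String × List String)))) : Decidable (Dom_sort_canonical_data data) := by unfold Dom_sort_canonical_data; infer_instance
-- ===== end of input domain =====

-- B flattens the nested dict to (category, subcategory, values) rows, orders them with two
-- stable radix-style sort passes (subcategory key, then category key), and regroups the rows
-- into a pre-seeded result dict — instead of A's three nested per-level sort loops with
-- per-key lookups (objective: alternative; same asymptotic cost).

-- ===== PORT A =====
def sort_canonical_data (data : Option (List (String × List (String × List String)))) : Option (List (String × List (String × List String))) :=
  match data with
  | none => none
  | some [] => none
  | some l =>
    let d := PySem.Dict.ofList l
    let sorted_data :=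
      (PySem.List.sorted d.keys PySem.Str.lower).foldl
        (fun sd category =>
          let inner := PySem.Dict.ofList (d.getD category [])
          let innerSorted :=
            (PySem.List.sorted inner.keys PySem.Str.lower).foldl
              (fun si subcategory =>
                si.insert subcategory (PySem.List.sorted (inner.getD subcategory []) PySem.Str.lower))
              PySem.Dict.empty
          sd.insert category innerSorted.items)
        PySem.Dict.empty
    some sorted_data.items

-- ===== PORT B =====
def sort_canonical_data_alt (data : Option (List (String × List (String × List String)))) : Option (List (String × List (String × List String))) :=
  match data with
  | some (x :: l) =>
    let d := PySem.Dict.ofList (x :: l)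
    let rows := d.items.flatMap (fun cv => (PySem.Dict.ofList cv.2).items.map (fun sv => (cv.1, sv.1, sv.2)))
    let rows1 := PySem.List.sorted rows (fun r => PySem.Str.lower r.2.1)
    let rows2 := PySem.List.sorted rows1 (fun r => PySem.Str.lower r.1)
    let seeded : PySem.Dict String (PySem.Dict String (List String)) :=
      (PySem.List.sorted d.keys PySem.Str.lower).foldl (fun r c => r.insert c PySem.Dict.empty) PySem.Dict.empty
    let final :=
      rows2.foldl
        (fun r t => r.modify t.1 PySem.Dict.empty
          (fun inner => inner.insert t.2.1 (PySem.List.sorted t.2.2 PySem.Str.lower)))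
        seeded
    some (final.items.map (fun kv => (kv.1, kv.2.items)))
  | _ => none

-- ===== PRECONDITION & SPEC =====
def Spec_sort_canonical_data (data : Option (List (String × List (String × List String)))) (out : Option (List (String × List (String × List String)))) : Prop := out = sort_canonical_data_alt data
instance (data : Option (List (String × List (String × List String)))) (out : Option (List (String × List (String × List String)))) : Decidable (Spec_sort_canonical_data data out) := by unfold Spec_sort_canonical_data; infer_instance

-- ===== CLAIM (what is proved, stated in full; the proofs are below) =====
def Claim_equal_sort_canonical_data : Prop := ∀ (data : Option (List (String × List (String × List String)))), Dom_sort_canonical_data data → Spec_sort_canonical_data data (sort_canonical_data data)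

-- ===== LEMMAS AND PROOFS =====

-- a stable insertion commutes with mapping when the order only looks through the map
lemma insertBy_map {α β : Type} (g : α → β) (p : β → β → Bool) (x : α) (ys : List α) :
    (PySem.List.insertBy (fun a b => p (g a) (g b)) x ys).map g
      = PySem.List.insertBy p (g x) (ys.map g) := by
  induction ys with
  | nil => simp [PySem.List.insertBy]
  | cons y ys ih =>
    simp only [PySem.List.insertBy, List.map_cons]
    split <;> simp [ih]

lemma sorted_foldl_map {α β κ : Type} [LT κ] [DecidableLT κ] (g : α → β) (key : β → κ)
    (xs : List α) (acc : List α) :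
    (xs.foldl (fun acc x => PySem.List.insertBy (fun a b => decide (key (g a) < key (g b))) x acc) acc).map g
      = (xs.map g).foldl (fun acc x => PySem.List.insertBy (fun a b => decide (key a < key b)) x acc) (acc.map g) := by
  induction xs generalizing acc with
  | nil => rfl
  | cons x xs ih =>
    simp only [List.foldl_cons, List.map_cons, ih]
    rw [insertBy_map g (fun a b => decide (key a < key b))]

-- stable sort commutes with projecting the sort key's argument
lemma sorted_map {α β κ : Type} [LT κ] [DecidableLT κ] (g : α → β) (key : β → κ) (xs : List α) :
    (PySem.List.sorted xs (fun a => key (g a))).map g = PySem.List.sorted (xs.map g) key := by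
  simpa [PySem.List.sorted] using sorted_foldl_map g key xs []

-- one level of A (sort the keys, look each key up, insert into a fresh dict) equals
-- a map over the items sorted by lowered key
lemma level_eq {β γ : Type} (d : PySem.Dict String β) (dflt : β) (f : β → γ)
    (hnd : d.keys.Nodup) :
    ((PySem.List.sorted d.keys PySem.Str.lower).foldl
        (fun acc k => acc.insert k (f (d.getD k dflt))) PySem.Dict.empty).items
      = (PySem.List.sorted d.items (fun kv => PySem.Str.lower kv.1)).map (fun kv => (kv.1, f kv.2)) := by
  have hkeys : PySem.List.sorted d.keys PySem.Str.lower
      = (PySem.List.sorted d.items (fun kv => PySem.Str.lower kv.1)).map Prod.fst := by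
    have := sorted_map (g := Prod.fst) (key := PySem.Str.lower) (xs := d.items)
    simpa [PySem.Dict.keys] using this.symm
  set s := PySem.List.sorted d.items (fun kv => PySem.Str.lower kv.1) with hs
  have hperm : s.Perm d.items := PySem.List.sorted_perm _ _ _
  have hnodup : (s.map Prod.fst).Nodup := by
    refine ((hperm.map Prod.fst).nodup_iff).mpr ?_
    simpa [PySem.Dict.keys] using hnd
  rw [hkeys, List.foldl_map,
      PySem.Dict.items_foldl_insert_fresh s Prod.fst (fun kv => f (d.getD kv.1 dflt))
        PySem.Dict.empty (by intro a _; simp [PySem.Dict.contains_empty]) hnodup]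
  simp only [show (PySem.Dict.empty : PySem.Dict String γ).items = [] from rfl, List.nil_append]
  refine List.map_congr_left ?_
  rintro ⟨k, v⟩ hm
  have hmem : (k, v) ∈ d.items := hperm.mem_iff.mp hm
  have hget : d.get? k = some v := PySem.Dict.get?_of_mem_items d hmem hnd
  simp [PySem.Dict.getD, hget]

-- the canonical value both programs compute
def canonForm (d : PySem.Dict String (List (String × List String))) : List (String × List (String × List String)) :=
  (PySem.List.sorted d.items (fun kv => PySem.Str.lower kv.1)).map
    (fun kv => (kv.1,
      (PySem.List.sorted (PySem.Dict.ofList kv.2).items (fun p => PySem.Str.lower p.1)).map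
        (fun p => (p.1, PySem.List.sorted p.2 PySem.Str.lower))))

-- ---- B-side lemmas ----

-- filtering drops an inserted element the predicate rejects
lemma filter_insertBy_neg {α : Type} (p : α → Bool) (lt : α → α → Bool) (x : α) (ys : List α)
    (hx : p x = false) :
    (PySem.List.insertBy lt x ys).filter p = ys.filter p := by
  induction ys with
  | nil => simp [PySem.List.insertBy, hx]
  | cons y ys ih =>
    simp only [PySem.List.insertBy]
    split
    · simp [List.filter_cons, hx]
    · simp only [List.filter_cons]
      split <;> simp [ih]

lemma insertBy_of_lt_all {α : Type} (lt : α → α → Bool) (x : α) (ys : List α)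
    (h : ∀ z ∈ ys, lt x z = true) :
    PySem.List.insertBy lt x ys = x :: ys := by
  cases ys with
  | nil => rfl
  | cons y ys => simp [PySem.List.insertBy, h y (by simp)]

-- filtering commutes with a stable insertion into a key-sorted list when the element survives
lemma filter_insertBy_pos {α κ : Type} [LinearOrder κ] (p : α → Bool) (key : α → κ) (x : α)
    (ys : List α) (hx : p x = true) (hs : ys.Pairwise (fun a b => key a ≤ key b)) :
    (PySem.List.insertBy (fun a b => decide (key a < key b)) x ys).filter p
      = PySem.List.insertBy (fun a b => decide (key a < key b)) x (ys.filter p) := by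
  induction ys with
  | nil => simp [PySem.List.insertBy, hx]
  | cons y ys ih =>
    have hhead : ∀ z ∈ ys, key y ≤ key z := (List.pairwise_cons.mp hs).1
    have htail := (List.pairwise_cons.mp hs).2
    simp only [PySem.List.insertBy]
    split
    · rename_i hlt
      have hxy : key x < key y := of_decide_eq_true hlt
      have hall : ∀ z ∈ (y :: ys).filter p, decide (key x < key z) = true := by
        intro z hz
        have hz' := List.mem_of_mem_filter hz
        rcases List.mem_cons.mp hz' with h | h
        · subst h; simp [hxy]
        · exact decide_eq_true (lt_of_lt_of_le hxy (hhead z h))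
      rw [insertBy_of_lt_all _ _ _ hall]
      simp [List.filter_cons, hx]
    · rename_i hlt
      simp only [List.filter_cons]
      split
      · simp only [PySem.List.insertBy]
        rw [ih htail]
        simp [hlt]
      · rw [ih htail]

-- filtering commutes with the stable sort
lemma filter_sorted {α κ : Type} [LinearOrder κ] (p : α → Bool) (key : α → κ) (xs : List α) :
    (PySem.List.sorted xs key).filter p = PySem.List.sorted (xs.filter p) key := by
  induction xs using List.reverseRecOn with
  | nil => rfl
  | append_singleton xs x ih =>
    have hstep : ∀ ys : List α, PySem.List.sorted (ys ++ [x]) key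
        = PySem.List.insertBy (fun a b => decide (key a < key b)) x (PySem.List.sorted ys key) := by
      intro ys
      rw [PySem.List.sorted_eq_foldl_insertBy, PySem.List.sorted_eq_foldl_insertBy, List.foldl_append]
      rfl
    rw [hstep]
    cases hp : p x with
    | true =>
      rw [filter_insertBy_pos p key x _ hp (PySem.List.sorted_pairwise xs key), ih]
      have hfa : (xs ++ [x]).filter p = xs.filter p ++ [x] := by
        simp [List.filter_append, hp]
      rw [hfa, hstep]
    | false =>
      rw [filter_insertBy_neg p _ x _ hp, ih, List.filter_append]
      simp [hp]

-- a sort whose key is constant on the list is the identity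
lemma sorted_const_key {α κ : Type} [LinearOrder κ] (key : α → κ) (k0 : κ) (xs : List α)
    (h : ∀ a ∈ xs, key a = k0) :
    PySem.List.sorted xs key = xs := by
  refine PySem.List.sorted_eq_self_of_pairwise xs key ?_
  induction xs with
  | nil => simp
  | cons x xs ih =>
    refine List.pairwise_cons.mpr ⟨?_, ih (fun a ha => h a (by simp [ha]))⟩
    intro b hb
    rw [h x (by simp), h b (by simp [hb])]

-- updating a set with elements it already holds is a no-op
lemma set_update_of_mem {α : Type} [BEq α] [LawfulBEq α] (s : PySem.Set α) (l : List α)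
    (h : ∀ x ∈ l, x ∈ s) :
    PySem.Set.update s l = s := by
  induction l with
  | nil => rfl
  | cons x l ih =>
    have hc : PySem.Set.contains s x = true :=
      List.elem_eq_true_of_mem (h x (by simp))
    show PySem.Set.update (PySem.Set.add s x) l = s
    rw [show PySem.Set.add s x = s by unfold PySem.Set.add; rw [if_pos hc]]
    exact ih (fun a ha => h a (by simp [ha]))

-- a grouping loop of modifies, read back at one key, is a fold over that key's rows
lemma getD_foldl_modify_group {κ ν β : Type} [BEq κ] [LawfulBEq κ] [DecidableEq κ]
    (l : List β) (k : β → κ) (d0 : ν) (f : β → ν → ν) (d : PySem.Dict κ ν) (c : κ) :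
    (l.foldl (fun r t => r.modify (k t) d0 (f t)) d).getD c d0
      = (l.filter (fun t => k t == c)).foldl (fun v t => f t v) (d.getD c d0) := by
  induction l generalizing d with
  | nil => rfl
  | cons t l ih =>
    simp only [List.foldl_cons, List.filter_cons, ih]
    by_cases hc : k t = c
    · subst hc; simp
    · have : (k t == c) = false := by simp [hc]
      rw [this]
      simp only [if_false, Bool.false_eq_true]
      rw [PySem.Dict.getD_modify]
      simp [Ne.symm hc]

-- filtering the flattened rows by an exact category picks out exactly that category's block
lemma filter_flatMap_fst {β γ : Type} (L : List (String × β)) (g : String × β → List (String × γ))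
    (hg : ∀ cv, ∀ t ∈ g cv, t.1 = cv.1) (hnd : (L.map Prod.fst).Nodup)
    (c : String) (b : β) (hmem : (c, b) ∈ L) :
    (L.flatMap g).filter (fun t => t.1 == c) = g (c, b) := by
  induction L with
  | nil => simp at hmem
  | cons cv L ih =>
    simp only [List.flatMap_cons, List.filter_append]
    have hnd0 := hnd
    simp only [List.map_cons, List.nodup_cons] at hnd0
    have hnd1 : cv.1 ∉ L.map Prod.fst := hnd0.1
    have hnd2 : (L.map Prod.fst).Nodup := hnd0.2
    by_cases hcv : cv.1 = c
    · have hcvb : cv = (c, b) := by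
        rcases List.mem_cons.mp hmem with h | h
        · exact h.symm
        · exact absurd (List.mem_map.mpr ⟨(c, b), h, rfl⟩) (hcv ▸ hnd1)
      have h1 : (g cv).filter (fun t => t.1 == c) = g cv := by
        refine List.filter_eq_self.mpr ?_
        intro t ht; simp [hg cv t ht, hcv]
      have h2 : (L.flatMap g).filter (fun t => t.1 == c) = [] := by
        refine List.filter_eq_nil_iff.mpr ?_
        intro t ht
        rcases List.mem_flatMap.mp ht with ⟨cw, hcw, htg⟩
        rw [hg cw t htg]
        simp only [beq_iff_eq]
        intro hEq
        exact (hcv ▸ hnd1) (hEq ▸ List.mem_map.mpr ⟨cw, hcw, rfl⟩)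
      rw [h1, h2, hcvb, List.append_nil]
    · have h1 : (g cv).filter (fun t => t.1 == c) = [] := by
        refine List.filter_eq_nil_iff.mpr ?_
        intro t ht; simp [hg cv t ht, hcv]
      have hmem' : (c, b) ∈ L := by
        rcases List.mem_cons.mp hmem with h | h
        · exact absurd (by rw [← h]) hcv
        · exact h
      rw [h1, List.nil_append, ih hnd2 hmem']

-- A computes the canonical form
lemma a_canon (l : List (String × List (String × List String))) (hne : l ≠ []) :
    sort_canonical_data (some l) = some (canonForm (PySem.Dict.ofList l)) := by
  match l, hne with
  | x :: l, _ =>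
    have hinner : ∀ subs : List (String × List String),
        ((PySem.List.sorted (PySem.Dict.ofList subs).keys PySem.Str.lower).foldl
            (fun si subcategory =>
              si.insert subcategory
                (PySem.List.sorted ((PySem.Dict.ofList subs).getD subcategory []) PySem.Str.lower))
            PySem.Dict.empty).items
          = (PySem.List.sorted (PySem.Dict.ofList subs).items (fun p => PySem.Str.lower p.1)).map
              (fun p => (p.1, PySem.List.sorted p.2 PySem.Str.lower)) :=
      fun subs => level_eq (PySem.Dict.ofList subs) []
        (fun vals => PySem.List.sorted vals PySem.Str.lower) (PySem.Dict.nodup_keys_ofList _)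
    unfold sort_canonical_data canonForm
    simp only
    congr 1
    simp only [hinner]
    exact level_eq (PySem.Dict.ofList (x :: l)) []
      (fun subs => (PySem.List.sorted (PySem.Dict.ofList subs).items (fun p => PySem.Str.lower p.1)).map
        (fun p => (p.1, PySem.List.sorted p.2 PySem.Str.lower)))
      (PySem.Dict.nodup_keys_ofList _)

-- B's pipeline (flatten, two stable sort passes, regroup) computes the canonical form
lemma b_core (L : List (String × List (String × List String))) :
    (((PySem.List.sorted
        (PySem.List.sorted
          ((PySem.Dict.ofList L).items.flatMap
            (fun cv => (PySem.Dict.ofList cv.2).items.map (fun sv => (cv.1, sv.1, sv.2))))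
          (fun r => PySem.Str.lower r.2.1))
        (fun r => PySem.Str.lower r.1)).foldl
      (fun r t => r.modify t.1 PySem.Dict.empty
        (fun inner => inner.insert t.2.1 (PySem.List.sorted t.2.2 PySem.Str.lower)))
      ((PySem.List.sorted (PySem.Dict.ofList L).keys PySem.Str.lower).foldl
        (fun r c => r.insert c PySem.Dict.empty) PySem.Dict.empty)).items).map
      (fun kv => (kv.1, kv.2.items))
    = canonForm (PySem.Dict.ofList L) := by
  set d := PySem.Dict.ofList L with hd
  set rows := d.items.flatMap (fun cv => (PySem.Dict.ofList cv.2).items.map (fun sv => (cv.1, sv.1, sv.2))) with hrows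
  set rows2 := PySem.List.sorted (PySem.List.sorted rows (fun r => PySem.Str.lower r.2.1)) (fun r => PySem.Str.lower r.1) with hrows2
  set seeded := (PySem.List.sorted d.keys PySem.Str.lower).foldl
    (fun r c => r.insert c PySem.Dict.empty)
    (PySem.Dict.empty : PySem.Dict String (PySem.Dict String (List String))) with hseeded
  set final := rows2.foldl
    (fun r t => r.modify t.1 PySem.Dict.empty
      (fun inner => inner.insert t.2.1 (PySem.List.sorted t.2.2 PySem.Str.lower))) seeded with hfinal
  have hnd : d.keys.Nodup := PySem.Dict.nodup_keys_ofList L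
  have hskperm : (PySem.List.sorted d.keys PySem.Str.lower).Perm d.keys :=
    PySem.List.sorted_perm d.keys PySem.Str.lower false
  have hsknodup : (PySem.List.sorted d.keys PySem.Str.lower).Nodup := hskperm.nodup_iff.mpr hnd
  have hseeditems : seeded.items
      = (PySem.List.sorted d.keys PySem.Str.lower).map
          (fun c => (c, (PySem.Dict.empty : PySem.Dict String (List String)))) := by
    rw [hseeded]
    have h := PySem.Dict.items_foldl_insert_fresh (PySem.List.sorted d.keys PySem.Str.lower)
      (fun c => c) (fun _ => (PySem.Dict.empty : PySem.Dict String (List String))) PySem.Dict.empty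
      (by intro a _; simp [PySem.Dict.contains_empty]) (by simpa using hsknodup)
    simpa using h
  have hseedkeys : seeded.keys = PySem.List.sorted d.keys PySem.Str.lower := by
    simp [PySem.Dict.keys, hseeditems, Function.comp_def]
  have hrowfst : ∀ t ∈ rows, t.1 ∈ d.keys := by
    intro t ht
    rcases List.mem_flatMap.mp (hrows ▸ ht) with ⟨cv, hcv, htm⟩
    rcases List.mem_map.mp htm with ⟨sv, _, rfl⟩
    simp only [PySem.Dict.keys]
    exact List.mem_map.mpr ⟨cv, hcv, rfl⟩
  have hrows2mem : ∀ t ∈ rows2, t ∈ rows := by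
    intro t ht
    have p1 := PySem.List.sorted_perm (PySem.List.sorted rows (fun r => PySem.Str.lower r.2.1))
      (fun r => PySem.Str.lower r.1) false
    have p2 := PySem.List.sorted_perm rows (fun r => PySem.Str.lower r.2.1) false
    exact p2.mem_iff.mp (p1.mem_iff.mp (hrows2 ▸ ht))
  have hfinalkeys : final.keys = seeded.keys := by
    rw [hfinal, PySem.Dict.keys_foldl_modify_key rows2 (fun t => t.1) PySem.Dict.empty
      (fun _ t => fun inner => inner.insert t.2.1 (PySem.List.sorted t.2.2 PySem.Str.lower)) seeded]
    apply set_update_of_mem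
    intro c hc
    rcases List.mem_map.mp hc with ⟨t, ht, rfl⟩
    rw [hseedkeys]
    simp only [PySem.List.mem_sorted]
    exact hrowfst t (hrows2mem t ht)
  have hfinalnodup : final.keys.Nodup := by
    rw [hfinalkeys, hseedkeys]; exact hsknodup
  have hkeysitems : PySem.List.sorted d.keys PySem.Str.lower
      = (PySem.List.sorted d.items (fun kv => PySem.Str.lower kv.1)).map Prod.fst := by
    have h := sorted_map (g := Prod.fst) (key := PySem.Str.lower) (xs := d.items)
    simpa [PySem.Dict.keys] using h.symm
  rw [PySem.Dict.items_eq_map_keys final hfinalnodup PySem.Dict.empty, hfinalkeys, hseedkeys,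
      hkeysitems]
  unfold canonForm
  simp only [List.map_map]
  refine List.map_congr_left ?_
  rintro ⟨c, subs⟩ hm
  have hmem : (c, subs) ∈ d.items :=
    (PySem.List.sorted_perm d.items (fun kv => PySem.Str.lower kv.1) false).mem_iff.mp hm
  simp only [Function.comp_apply]
  refine Prod.ext rfl ?_
  have hcseed : c ∈ PySem.List.sorted d.keys PySem.Str.lower := by
    simp only [PySem.List.mem_sorted, PySem.Dict.keys]
    exact List.mem_map.mpr ⟨(c, subs), hmem, rfl⟩
  have hfilter : rows2.filter (fun t => t.1 == c)
      = (PySem.List.sorted (PySem.Dict.ofList subs).items (fun p => PySem.Str.lower p.1)).map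
          (fun sv => (c, sv.1, sv.2)) := by
    rw [hrows2, filter_sorted, filter_sorted]
    have hblock : rows.filter (fun t => t.1 == c)
        = (PySem.Dict.ofList subs).items.map (fun sv => (c, sv.1, sv.2)) := by
      rw [hrows]
      have h := filter_flatMap_fst d.items
        (fun cv => (PySem.Dict.ofList cv.2).items.map (fun sv => (cv.1, sv.1, sv.2)))
        (by rintro cv t ht; rcases List.mem_map.mp ht with ⟨sv, _, rfl⟩; rfl)
        (by simpa [PySem.Dict.keys] using hnd) c subs hmem
      simpa using h
    rw [hblock]
    have h3 : PySem.List.sorted ((PySem.Dict.ofList subs).items.map (fun sv => (c, sv.1, sv.2)))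
          (fun r => PySem.Str.lower r.2.1)
        = (PySem.List.sorted (PySem.Dict.ofList subs).items (fun p => PySem.Str.lower p.1)).map
            (fun sv => (c, sv.1, sv.2)) := by
      have h := sorted_map (g := fun sv : String × List String => (c, sv.1, sv.2))
        (key := fun r : String × String × List String => PySem.Str.lower r.2.1)
        (xs := (PySem.Dict.ofList subs).items)
      simpa using h.symm
    rw [h3]
    exact sorted_const_key _ (PySem.Str.lower c) _
      (by rintro r hr; rcases List.mem_map.mp hr with ⟨sv, _, rfl⟩; rfl)
  have hsubsnodup : ((PySem.List.sorted (PySem.Dict.ofList subs).items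
      (fun p => PySem.Str.lower p.1)).map Prod.fst).Nodup := by
    refine (((PySem.List.sorted_perm (PySem.Dict.ofList subs).items
      (fun p => PySem.Str.lower p.1) false).map Prod.fst).nodup_iff).mpr ?_
    simpa [PySem.Dict.keys] using PySem.Dict.nodup_keys_ofList subs
  have hgetD : final.getD c PySem.Dict.empty
      = (PySem.List.sorted (PySem.Dict.ofList subs).items (fun p => PySem.Str.lower p.1)).foldl
          (fun inner sv => inner.insert sv.1 (PySem.List.sorted sv.2 PySem.Str.lower))
          PySem.Dict.empty := by
    rw [hfinal]
    rw [getD_foldl_modify_group rows2 (fun t => t.1) PySem.Dict.empty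
      (fun t => fun inner => inner.insert t.2.1 (PySem.List.sorted t.2.2 PySem.Str.lower)) seeded c]
    have hcs : (c, (PySem.Dict.empty : PySem.Dict String (List String))) ∈ seeded.items := by
      rw [hseeditems]
      exact List.mem_map.mpr ⟨c, hcseed, rfl⟩
    rw [PySem.Dict.getD_of_mem_items seeded hcs (by rw [hseedkeys]; exact hsknodup) PySem.Dict.empty]
    rw [show rows2.filter (fun t => (fun t => t.1) t == c) = rows2.filter (fun t => t.1 == c) from rfl,
        hfilter, List.foldl_map]
  rw [hgetD]
  rw [PySem.Dict.items_foldl_insert_fresh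
      (PySem.List.sorted (PySem.Dict.ofList subs).items (fun p => PySem.Str.lower p.1))
      Prod.fst (fun sv => PySem.List.sorted sv.2 PySem.Str.lower) PySem.Dict.empty
      (by intro a _; simp [PySem.Dict.contains_empty]) hsubsnodup]
  simp [show (PySem.Dict.empty : PySem.Dict String (List String)).items = [] from rfl]

-- B computes the canonical form
lemma b_canon (l : List (String × List (String × List String))) (hne : l ≠ []) :
    sort_canonical_data_alt (some l) = some (canonForm (PySem.Dict.ofList l)) := by
  match l, hne with
  | x :: l, _ => exact congrArg some (b_core (x :: l))

-- ===== VERDICT (by name: the statement is the Claim_ definition above) =====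
theorem sort_canonical_data_spec : Claim_equal_sort_canonical_data := by
  intro data _
  unfold Spec_sort_canonical_data
  match data with
  | none => rfl
  | some [] => rfl
  | some (x :: l) =>
    rw [a_canon (x :: l) (by simp), b_canon (x :: l) (by simp)]
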